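-- pv_equiv track=rewrite | github.com/apeltop/learning | algorithm/programmers/258712.py | solution
-- ===== SOURCE A (Python) =====
-- from collections import defaultdict
--
-- def solution(friends, gifts):
--     give_dict = defaultdict(dict)
--     gift_index = defaultdict(int)
--
--     for gift in gifts:
--         a, b = gift.split(" ")
--         if b not in give_dict[a]:
--             give_dict[a][b] = 1
--         else:
--             give_dict[a][b] += 1
--
--         gift_index[a] += 1
--         gift_index[b] -= 1
--
--     predict_dict = defaultdict(int)
--
--     for friend_a in friends:
--         for friend_b in friends:
--             if friend_a == friend_b:
--                 continue
--
--             if friend_b not in give_dict[friend_a]: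
--                 give_dict[friend_a][friend_b] = 0
--             if friend_a not in give_dict[friend_b]:
--                 give_dict[friend_b][friend_a] = 0
--
--             if give_dict[friend_a][friend_b] > give_dict[friend_b][friend_a]:
--                 predict_dict[friend_a] += 1
--             elif give_dict[friend_a][friend_b] == give_dict[friend_b][friend_a]:
--                 if gift_index[friend_a] > gift_index[friend_b]:
--                     predict_dict[friend_a] += 1
--
--     if not predict_dict.items():
--         return 0
--
--     return max([v for k, v in predict_dict.items()])
-- ===== SOURCE B (Python) =====
-- def solution(friends, gifts):
--     cnt = {}
--     idx = {}
--     for gift in gifts: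
--         a, b = gift.split(" ")
--         cnt[(a, b)] = cnt.get((a, b), 0) + 1
--         idx[a] = idx.get(a, 0) + 1
--         idx[b] = idx.get(b, 0) - 1
--     scores = {}
--     rest = friends
--     while rest:
--         a, rest = rest[0], rest[1:]
--         for b in rest:
--             if a == b:
--                 continue
--             ga = cnt.get((a, b), 0)
--             gb = cnt.get((b, a), 0)
--             if ga > gb:
--                 w = a
--             elif gb > ga:
--                 w = b
--             elif idx.get(a, 0) > idx.get(b, 0):
--                 w = a
--             elif idx.get(b, 0) > idx.get(a, 0):
--                 w = b
--             else:
--                 continue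
--             scores[w] = scores.get(w, 0) + 1
--     return max(scores.values(), default=0)
-- ===== Notes on version B (the rewrite author's own statement) =====
-- stated objective: alternative
-- what changed: Replaces A's nested dict-of-dicts plus a full n-by-n ordered double scan (which also mutates give_dict with zero entries for every pair) by a flat pair-keyed counter and a single triangular scan over suffix pairs that awards each unordered pair's point directly to the winner via read-only lookups.
import Mathlib
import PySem

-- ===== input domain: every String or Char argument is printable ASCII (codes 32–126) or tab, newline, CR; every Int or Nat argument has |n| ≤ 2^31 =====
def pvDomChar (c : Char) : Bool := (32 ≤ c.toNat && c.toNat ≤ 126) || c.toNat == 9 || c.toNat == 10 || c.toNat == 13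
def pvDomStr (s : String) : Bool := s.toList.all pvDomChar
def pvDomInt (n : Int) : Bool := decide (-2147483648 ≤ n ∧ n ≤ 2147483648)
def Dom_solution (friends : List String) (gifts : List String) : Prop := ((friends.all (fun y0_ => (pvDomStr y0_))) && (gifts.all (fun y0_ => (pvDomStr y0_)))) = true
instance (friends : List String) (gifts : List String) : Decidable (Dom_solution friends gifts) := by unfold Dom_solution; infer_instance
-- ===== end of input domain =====

-- B replaces A's dict-of-dicts and full n×n ordered double scan by a flat pair-keyed
-- counter and a single triangular scan over suffix pairs (read-only lookups); objective: alternative.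
-- (A mutates give_dict in place while scoring; the equivalence proved here is about the return value.)

-- ===== PORT A =====
-- shared with port B: 'a, b = gift.split(" ")'; none = ValueError (excluded by Pre_)
def pvParse (g : String) : Option (String × String) :=
  match PySem.Str.split? g " " with
  | some [a, b] => some (a, b)
  | _ => none

-- 'if b not in give_dict[a]: give_dict[a][b] = 1 else: give_dict[a][b] += 1' (defaultdict(dict))
def pvGiveStepA (G : PySem.Dict String (PySem.Dict String Int)) (p : String × String) :
    PySem.Dict String (PySem.Dict String Int) :=
  let inner := G.getD p.1 PySem.Dict.empty
  let inner :=
    if inner.contains p.2 = false then inner.insert p.2 1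
    else inner.insert p.2 (inner.getD p.2 0 + 1)
  G.insert p.1 inner

-- shared with port B: 'gift_index[a] += 1; gift_index[b] -= 1' (defaultdict(int) reads = getD 0)
def pvIdxStep (I : PySem.Dict String Int) (p : String × String) : PySem.Dict String Int :=
  let I := I.insert p.1 (I.getD p.1 0 + 1)
  I.insert p.2 (I.getD p.2 0 - 1)

-- one iteration of A's 'for gift in gifts' loop
def pvGiftStepA (st : PySem.Dict String (PySem.Dict String Int) × PySem.Dict String Int)
    (g : String) : PySem.Dict String (PySem.Dict String Int) × PySem.Dict String Int :=
  match pvParse g with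
  | some p => (pvGiveStepA st.1 p, pvIdxStep st.2 p)
  | none => st

-- 'if y not in give_dict[x]: give_dict[x][y] = 0' (defaultdict access vivifies x; exact here)
def pvVivify (G : PySem.Dict String (PySem.Dict String Int)) (x y : String) :
    PySem.Dict String (PySem.Dict String Int) :=
  if (G.getD x PySem.Dict.empty).contains y = false then
    G.insert x ((G.getD x PySem.Dict.empty).insert y 0)
  else G

-- the body of A's double loop over friends (gift_index reads ported as getD 0: the 0 a
-- defaultdict read inserts never changes any later read)
def pvScoreStepA (I : PySem.Dict String Int)
    (st : PySem.Dict String (PySem.Dict String Int) × PySem.Dict String Int)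
    (fa fb : String) :
    PySem.Dict String (PySem.Dict String Int) × PySem.Dict String Int :=
  if fa == fb then st
  else
    let g2 := pvVivify (pvVivify st.1 fa fb) fb fa
    let va := (g2.getD fa PySem.Dict.empty).getD fb 0
    let vb := (g2.getD fb PySem.Dict.empty).getD fa 0
    if va > vb then (g2, st.2.insert fa (st.2.getD fa 0 + 1))
    else if va == vb then
      if I.getD fa 0 > I.getD fb 0 then (g2, st.2.insert fa (st.2.getD fa 0 + 1))
      else (g2, st.2)
    else (g2, st.2)

def solution (friends : List String) (gifts : List String) : Int :=
  let gi := gifts.foldl pvGiftStepA (PySem.Dict.empty, PySem.Dict.empty)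
  let fin := friends.foldl
    (fun st fa => friends.foldl (fun st fb => pvScoreStepA gi.2 st fa fb) st)
    (gi.1, PySem.Dict.empty)
  if fin.2.items.isEmpty then 0
  else (PySem.List.max? (fin.2.items.map (fun kv => kv.2)) (fun v => v)).getD 0

-- ===== PORT B =====
-- 'cnt[(a, b)] = cnt.get((a, b), 0) + 1'
def pvCntStepB (c : PySem.Dict (String × String) Int) (p : String × String) :
    PySem.Dict (String × String) Int :=
  c.insert p (c.getD p 0 + 1)

-- one iteration of B's 'for gift in gifts' loop
def pvGiftStepB (st : PySem.Dict (String × String) Int × PySem.Dict String Int)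
    (g : String) : PySem.Dict (String × String) Int × PySem.Dict String Int :=
  match pvParse g with
  | some p => (pvCntStepB st.1 p, pvIdxStep st.2 p)
  | none => st

-- body of B's inner 'for b in rest' loop
def pvPairStepB (cnt : PySem.Dict (String × String) Int) (idx : PySem.Dict String Int)
    (a : String) (sc : PySem.Dict String Int) (b : String) : PySem.Dict String Int :=
  if a == b then sc
  else
    let ga := cnt.getD (a, b) 0
    let gb := cnt.getD (b, a) 0
    if ga > gb then sc.insert a (sc.getD a 0 + 1)
    else if gb > ga then sc.insert b (sc.getD b 0 + 1)
    else if idx.getD a 0 > idx.getD b 0 then sc.insert a (sc.getD a 0 + 1)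
    else if idx.getD b 0 > idx.getD a 0 then sc.insert b (sc.getD b 0 + 1)
    else sc

-- B's 'while rest:' suffix loop
def pvGoB (cnt : PySem.Dict (String × String) Int) (idx : PySem.Dict String Int) :
    List String → PySem.Dict String Int → PySem.Dict String Int
  | [], sc => sc
  | a :: rest, sc => pvGoB cnt idx rest (rest.foldl (pvPairStepB cnt idx a) sc)

def solution_alt (friends : List String) (gifts : List String) : Int :=
  let ci := gifts.foldl pvGiftStepB (PySem.Dict.empty, PySem.Dict.empty)
  let sc := pvGoB ci.1 ci.2 friends PySem.Dict.empty
  (PySem.List.max? sc.values (fun v => v)).getD 0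

-- ===== PRECONDITION & SPEC =====
-- Pre_ excludes exactly the gifts on which 'a, b = gift.split(" ")' raises ValueError
-- (a gift string that does not split on single spaces into exactly two parts).
def Pre_solution (friends : List String) (gifts : List String) : Prop :=
  ∀ g ∈ gifts, ((PySem.Str.split? g " ").getD []).length = 2
instance (friends : List String) (gifts : List String) : Decidable (Pre_solution friends gifts) := by
  unfold Pre_solution; infer_instance
def pvWitness_solution : List String × List String :=
  (["muzi", "ryan", "frodo"], ["muzi frodo", "ryan muzi", "muzi frodo"])

def Spec_solution (friends : List String) (gifts : List String) (out : Int) : Prop := out = solution_alt friends gifts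
instance (friends : List String) (gifts : List String) (out : Int) : Decidable (Spec_solution friends gifts out) := by unfold Spec_solution; infer_instance

-- ===== CLAIM (what is proved, stated in full; the proofs are below) =====
def Claim_equal_solution : Prop := ∀ (friends : List String) (gifts : List String), Dom_solution friends gifts → Pre_solution friends gifts → Spec_solution friends gifts (solution friends gifts)

-- ===== LEMMAS AND PROOFS =====

-- abstract view of A's nested tally
def pvViewG (G : PySem.Dict String (PySem.Dict String Int)) (x y : String) : Int :=
  (G.getD x PySem.Dict.empty).getD y 0

-- 'a is predicted to give to b' (decided from B's flat tally)
def pvWinB (c : PySem.Dict (String × String) Int) (I : PySem.Dict String Int)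
    (a b : String) : Bool :=
  decide (c.getD (b, a) 0 < c.getD (a, b) 0) ||
    (decide (c.getD (a, b) 0 = c.getD (b, a) 0) && decide (I.getD b 0 < I.getD a 0))

-- contribution of the ordered pair (a, b) to x's score
def pvH (c : PySem.Dict (String × String) Int) (I : PySem.Dict String Int)
    (x a b : String) : Int :=
  if a ≠ b ∧ pvWinB c I a b = true ∧ a = x then 1 else 0

-- triangular sum of pair contributions (B's traversal order)
def pvT (c : PySem.Dict (String × String) Int) (I : PySem.Dict String Int)
    (x : String) : List String → Int
  | [] => 0
  | a :: r => (r.map (fun b => pvH c I x a b + pvH c I x b a)).sum + pvT c I x r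

-- named pieces of the two pipelines (proof bookkeeping only)
def pvPairs (gifts : List String) : List (String × String) := gifts.filterMap pvParse
def pvC (gifts : List String) : PySem.Dict (String × String) Int :=
  (pvPairs gifts).foldl pvCntStepB PySem.Dict.empty
def pvI (gifts : List String) : PySem.Dict String Int :=
  (pvPairs gifts).foldl pvIdxStep PySem.Dict.empty
def pvG (gifts : List String) : PySem.Dict String (PySem.Dict String Int) :=
  (pvPairs gifts).foldl pvGiveStepA PySem.Dict.empty
def pvPA (friends gifts : List String) : PySem.Dict String Int :=
  (friends.foldl
    (fun st fa => friends.foldl (fun st fb => pvScoreStepA (pvI gifts) st fa fb) st)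
    (pvG gifts, PySem.Dict.empty)).2
def pvSB (friends gifts : List String) : PySem.Dict String Int :=
  pvGoB (pvC gifts) (pvI gifts) friends PySem.Dict.empty

-- generic fold invariant
theorem pv_foldl_inv {s a : Type} (f : s -> a -> s) (P : s -> Prop)
    (h : forall st x, P st -> P (f st x)) : forall (l : List a) (st : s), P st -> P (l.foldl f st) := by
  intro l
  induction l with
  | nil => intro st hs; exact hs
  | cons x t ih => intro st hs; exact ih _ (h st x hs)

-- small sum helpers
theorem pv_sum_add (f g : String -> Int) (l : List String) :
    (l.map (fun b => f b + g b)).sum = (l.map f).sum + (l.map g).sum := by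
  induction l with
  | nil => simp
  | cons a t ih => simp [ih]; ring

theorem pv_sum_countP (p : String -> Bool) (l : List String) :
    (l.map (fun b => if p b = true then (1 : Int) else 0)).sum = (l.countP p : Int) := by
  induction l with
  | nil => simp
  | cons a t ih =>
    by_cases h : p a = true <;> simp [h, ih, List.countP_cons] <;> ring

theorem pv_sum_if_const (x : String) (K : Int) (l : List String) :
    (l.map (fun a => if a = x then K else 0)).sum = (l.count x : Int) * K := by
  induction l with
  | nil => simp
  | cons a t ih =>
    by_cases h : a = x <;> simp [h, ih, List.count_cons] <;> push_cast <;> ring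

-- ===== phase 1: the two gift folds build the same tally =====

theorem pv_gift_fold_A (l : List String)
    (st : PySem.Dict String (PySem.Dict String Int) × PySem.Dict String Int) :
    l.foldl pvGiftStepA st
      = ((l.filterMap pvParse).foldl pvGiveStepA st.1,
         (l.filterMap pvParse).foldl pvIdxStep st.2) := by
  induction l generalizing st with
  | nil => simp
  | cons g t ih =>
    simp only [List.foldl_cons, List.filterMap_cons]
    cases h : pvParse g with
    | none => simp only [pvGiftStepA, h]; exact ih st
    | some p => simp only [pvGiftStepA, h]; exact ih _

theorem pv_gift_fold_B (l : List String)
    (st : PySem.Dict (String × String) Int × PySem.Dict String Int) :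
    l.foldl pvGiftStepB st
      = ((l.filterMap pvParse).foldl pvCntStepB st.1,
         (l.filterMap pvParse).foldl pvIdxStep st.2) := by
  induction l generalizing st with
  | nil => simp
  | cons g t ih =>
    simp only [List.foldl_cons, List.filterMap_cons]
    cases h : pvParse g with
    | none => simp only [pvGiftStepB, h]; exact ih st
    | some p => simp only [pvGiftStepB, h]; exact ih _

theorem pv_view_giveStep (G : PySem.Dict String (PySem.Dict String Int))
    (p : String × String) (x y : String) :
    pvViewG (pvGiveStepA G p) x y
      = if x = p.1 ∧ y = p.2 then pvViewG G x y + 1 else pvViewG G x y := by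
  unfold pvGiveStepA pvViewG
  by_cases hc : (G.getD p.1 PySem.Dict.empty).contains p.2 = false
  · simp only [hc, if_pos rfl, eq_self_iff_true, if_true]
    rw [PySem.Dict.getD_insert]
    by_cases hx : x = p.1 <;> by_cases hy : y = p.2 <;>
      simp [hx, hy, PySem.Dict.getD_insert, PySem.Dict.getD_of_not_contains _ _ hc]
  · have hc' : (G.getD p.1 PySem.Dict.empty).contains p.2 = true := by
      cases h : (G.getD p.1 PySem.Dict.empty).contains p.2 <;> simp_all
    simp only [hc', if_neg]
    rw [if_neg (by simp)]
    rw [PySem.Dict.getD_insert]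
    by_cases hx : x = p.1 <;> by_cases hy : y = p.2 <;>
      simp [hx, hy, PySem.Dict.getD_insert]

theorem pv_cnt_view (ps : List (String × String)) :
    ∀ (G : PySem.Dict String (PySem.Dict String Int)) (c : PySem.Dict (String × String) Int),
      (∀ x y, pvViewG G x y = c.getD (x, y) 0) →
      ∀ x y, pvViewG (ps.foldl pvGiveStepA G) x y = (ps.foldl pvCntStepB c).getD (x, y) 0 := by
  induction ps with
  | nil => intro G c h x y; exact h x y
  | cons p t ih =>
    intro G c h x y
    simp only [List.foldl_cons]
    refine ih _ _ ?_ x y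
    intro x' y'
    rw [pv_view_giveStep]
    unfold pvCntStepB
    rw [PySem.Dict.getD_insert]
    by_cases hx : x' = p.1 <;> by_cases hy : y' = p.2 <;>
      simp [hx, hy, Prod.ext_iff, h]

-- ===== phase 2, A side: the double scan counts ordered wins =====

theorem pv_vivify_view (G : PySem.Dict String (PySem.Dict String Int)) (a b x y : String) :
    pvViewG (pvVivify G a b) x y = pvViewG G x y := by
  unfold pvVivify pvViewG
  by_cases hc : (G.getD a PySem.Dict.empty).contains b = false
  · rw [if_pos hc, PySem.Dict.getD_insert]
    by_cases hx : x = a <;> by_cases hy : y = b <;>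
      simp [hx, hy, PySem.Dict.getD_insert, PySem.Dict.getD_of_not_contains _ _ hc]
  · rw [if_neg hc]

theorem pv_stepA (I : PySem.Dict String Int) (c : PySem.Dict (String × String) Int)
    (st : PySem.Dict String (PySem.Dict String Int) × PySem.Dict String Int)
    (fa fb : String) (hG : ∀ x y, pvViewG st.1 x y = c.getD (x, y) 0) :
    (∀ x y, pvViewG (pvScoreStepA I st fa fb).1 x y = c.getD (x, y) 0) ∧
    (pvScoreStepA I st fa fb).2
      = if fa ≠ fb ∧ pvWinB c I fa fb = true then st.2.insert fa (st.2.getD fa 0 + 1)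
        else st.2 := by
  have hv2 : ∀ x y, pvViewG (pvVivify (pvVivify st.1 fa fb) fb fa) x y = c.getD (x, y) 0 := by
    intro x y; rw [pv_vivify_view, pv_vivify_view]; exact hG x y
  have hva : ((pvVivify (pvVivify st.1 fa fb) fb fa).getD fa PySem.Dict.empty).getD fb 0
      = c.getD (fa, fb) 0 := hv2 fa fb
  have hvb : ((pvVivify (pvVivify st.1 fa fb) fb fa).getD fb PySem.Dict.empty).getD fa 0
      = c.getD (fb, fa) 0 := hv2 fb fa
  unfold pvScoreStepA
  by_cases hab : fa = fb
  · simp only [hab, beq_self_eq_true, if_true]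
    exact ⟨hG, by simp⟩
  · have hb : (fa == fb) = false := by simp [hab]
    simp only [hb, Bool.false_eq_true, if_false]
    simp only [hva, hvb, pvWinB]
    constructor
    · intro x y; split_ifs <;> exact hv2 x y
    · split_ifs with h1 h2 h3 h4 <;> simp_all <;> omega

theorem pv_innerA (I : PySem.Dict String Int) (c : PySem.Dict (String × String) Int)
    (fa : String) (bs : List String) :
    ∀ (st : PySem.Dict String (PySem.Dict String Int) × PySem.Dict String Int),
      (∀ x y, pvViewG st.1 x y = c.getD (x, y) 0) →
      (∀ x y, pvViewG (bs.foldl (fun st fb => pvScoreStepA I st fa fb) st).1 x y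
                = c.getD (x, y) 0) ∧
      (bs.foldl (fun st fb => pvScoreStepA I st fa fb) st).2
        = bs.foldl
            (fun P fb => if fa ≠ fb ∧ pvWinB c I fa fb = true
                         then P.insert fa (P.getD fa 0 + 1) else P) st.2 := by
  induction bs with
  | nil => intro st h; exact ⟨h, rfl⟩
  | cons b t ih =>
    intro st hst
    simp only [List.foldl_cons]
    obtain ⟨h1, h2⟩ := pv_stepA I c st fa b hst
    obtain ⟨ih1, ih2⟩ := ih (pvScoreStepA I st fa b) h1
    exact ⟨ih1, by rw [ih2, h2]⟩

theorem pv_pure_inner_getD (I : PySem.Dict String Int) (c : PySem.Dict (String × String) Int)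
    (fa : String) (bs : List String) :
    ∀ (P : PySem.Dict String Int) (x : String),
      (bs.foldl
        (fun P fb => if fa ≠ fb ∧ pvWinB c I fa fb = true
                     then P.insert fa (P.getD fa 0 + 1) else P) P).getD x 0
        = P.getD x 0 +
            if x = fa
            then (bs.countP (fun b => decide (fa ≠ b) && pvWinB c I fa b) : Int)
            else 0 := by
  induction bs with
  | nil => intro P x; simp
  | cons b t ih =>
    intro P x
    simp only [List.foldl_cons, List.countP_cons]
    by_cases hc : fa ≠ b ∧ pvWinB c I fa b = true
    · rw [if_pos hc, ih, PySem.Dict.getD_insert]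
      by_cases hx : x = fa <;> simp [hx, hc] <;> push_cast <;> omega
    · rw [if_neg hc, ih]
      simp [hc]

theorem pv_outerA (I : PySem.Dict String Int) (c : PySem.Dict (String × String) Int)
    (friends : List String) :
    ∀ (as_ : List String)
      (st : PySem.Dict String (PySem.Dict String Int) × PySem.Dict String Int),
      (∀ x y, pvViewG st.1 x y = c.getD (x, y) 0) →
      ∀ x,
        (as_.foldl
          (fun st fa => friends.foldl (fun st fb => pvScoreStepA I st fa fb) st) st).2.getD x 0
          = st.2.getD x 0 +
              (as_.count x : Int) *
                (friends.countP (fun b => decide (x ≠ b) && pvWinB c I x b) : Int) := by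
  intro as_
  induction as_ with
  | nil => intro st h x; simp
  | cons fa rest ih =>
    intro st hst x
    simp only [List.foldl_cons]
    obtain ⟨h1, h2⟩ := pv_innerA I c fa friends st hst
    have hrec := ih (friends.foldl (fun st fb => pvScoreStepA I st fa fb) st) h1 x
    rw [hrec, h2, pv_pure_inner_getD, List.count_cons]
    by_cases hx : x = fa
    · simp [hx]
      push_cast
      ring
    · have hfx : (fa == x) = false := by
        simp
        exact fun h => hx h.symm
      simp [hx, hfx]

-- ===== phase 2, B side: the triangular scan =====

theorem pv_winB_antisym (cnt : PySem.Dict (String × String) Int) (idx : PySem.Dict String Int)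
    (a b : String) (h1 : pvWinB cnt idx a b = true) (h2 : pvWinB cnt idx b a = true) : False := by
  unfold pvWinB at h1 h2
  simp at h1 h2
  omega

theorem pv_pairB_eq (cnt : PySem.Dict (String × String) Int) (idx : PySem.Dict String Int)
    (a : String) (sc : PySem.Dict String Int) (b : String) :
    pvPairStepB cnt idx a sc b =
      if a ≠ b ∧ pvWinB cnt idx a b = true then sc.insert a (sc.getD a 0 + 1)
      else if a ≠ b ∧ pvWinB cnt idx b a = true then sc.insert b (sc.getD b 0 + 1)
      else sc := by
  unfold pvPairStepB pvWinB
  by_cases hab : a = b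
  · simp [hab]
  · have hb : (a == b) = false := by simp [hab]
    simp only [hb, Bool.false_eq_true, if_false]
    split_ifs <;> simp_all <;> omega

theorem pv_H_pos (c : PySem.Dict (String × String) Int) (I : PySem.Dict String Int)
    (x a b : String) (h1 : a ≠ b) (h2 : pvWinB c I a b = true) (h3 : a = x) :
    pvH c I x a b = 1 := by
  unfold pvH
  rw [if_pos ⟨h1, h2, h3⟩]

theorem pv_H_zero_notwin (c : PySem.Dict (String × String) Int) (I : PySem.Dict String Int)
    (x a b : String) (h2 : ¬ pvWinB c I a b = true) : pvH c I x a b = 0 := by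
  unfold pvH
  rw [if_neg]
  intro hc
  exact h2 hc.2.1

theorem pv_H_zero_ne (c : PySem.Dict (String × String) Int) (I : PySem.Dict String Int)
    (x a b : String) (h3 : ¬ a = x) : pvH c I x a b = 0 := by
  unfold pvH
  rw [if_neg]
  intro hc
  exact h3 hc.2.2

theorem pv_pairStep_getD (cnt : PySem.Dict (String × String) Int) (idx : PySem.Dict String Int)
    (a : String) (sc : PySem.Dict String Int) (b x : String) :
    (pvPairStepB cnt idx a sc b).getD x 0
      = sc.getD x 0 + pvH cnt idx x a b + pvH cnt idx x b a := by
  rw [pv_pairB_eq]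
  by_cases hab : a = b
  · subst hab
    simp [pvH]
  · have hba : b ≠ a := fun h => hab h.symm
    by_cases hwab : pvWinB cnt idx a b = true
    · have hnba : ¬ pvWinB cnt idx b a = true :=
        fun h => pv_winB_antisym cnt idx a b hwab h
      rw [if_pos ⟨hab, hwab⟩, PySem.Dict.getD_insert,
        pv_H_zero_notwin cnt idx x b a hnba]
      by_cases hx : x = a
      · rw [pv_H_pos cnt idx x a b hab hwab hx.symm, if_pos hx, hx]; ring
      · rw [pv_H_zero_ne cnt idx x a b (fun h => hx h.symm), if_neg hx]; ring
    · rw [if_neg (fun hcon => hwab hcon.2), pv_H_zero_notwin cnt idx x a b hwab]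
      by_cases hwba : pvWinB cnt idx b a = true
      · rw [if_pos ⟨hab, hwba⟩, PySem.Dict.getD_insert]
        by_cases hx : x = b
        · rw [pv_H_pos cnt idx x b a hba hwba hx.symm, if_pos hx, hx]; ring
        · rw [pv_H_zero_ne cnt idx x b a (fun h => hx h.symm), if_neg hx]; ring
      · rw [if_neg (fun hcon => hwba hcon.2), pv_H_zero_notwin cnt idx x b a hwba]
        ring

theorem pv_innerB_getD (cnt : PySem.Dict (String × String) Int) (idx : PySem.Dict String Int)
    (a : String) (r : List String) :
    ∀ (sc : PySem.Dict String Int) (x : String),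
      (r.foldl (pvPairStepB cnt idx a) sc).getD x 0
        = sc.getD x 0 + (r.map (fun b => pvH cnt idx x a b + pvH cnt idx x b a)).sum := by
  induction r with
  | nil => intro sc x; simp
  | cons b t ih =>
    intro sc x
    simp only [List.foldl_cons, List.map_cons, List.sum_cons]
    rw [ih, pv_pairStep_getD]
    ring

theorem pv_goB_getD (cnt : PySem.Dict (String × String) Int) (idx : PySem.Dict String Int)
    (l : List String) :
    ∀ (sc : PySem.Dict String Int) (x : String),
      (pvGoB cnt idx l sc).getD x 0 = sc.getD x 0 + pvT cnt idx x l := by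
  induction l with
  | nil => intro sc x; simp [pvGoB, pvT]
  | cons a r ih =>
    intro sc x
    show (pvGoB cnt idx r (r.foldl (pvPairStepB cnt idx a) sc)).getD x 0 = _
    rw [ih, pv_innerB_getD]
    show _ = sc.getD x 0 + ((r.map (fun b => pvH cnt idx x a b + pvH cnt idx x b a)).sum
      + pvT cnt idx x r)
    ring

-- ===== combinatorial core: triangular sum = square sum = count × wins =====

theorem pv_H_diag (c : PySem.Dict (String × String) Int) (I : PySem.Dict String Int)
    (x a : String) : pvH c I x a a = 0 := by
  simp [pvH]

theorem pv_H_split (c : PySem.Dict (String × String) Int) (I : PySem.Dict String Int)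
    (x a b : String) :
    pvH c I x a b
      = if a = x then (if x ≠ b ∧ pvWinB c I x b = true then (1 : Int) else 0) else 0 := by
  unfold pvH
  by_cases ha : a = x
  · subst ha; simp
  · simp [ha]

theorem pv_T_eq_square (c : PySem.Dict (String × String) Int) (I : PySem.Dict String Int)
    (x : String) (l : List String) :
    pvT c I x l = (l.map (fun a => (l.map (fun b => pvH c I x a b)).sum)).sum := by
  induction l with
  | nil => simp [pvT]
  | cons a r ih =>
    show (r.map (fun b => pvH c I x a b + pvH c I x b a)).sum + pvT c I x r = _
    simp only [List.map_cons, List.sum_cons, pv_sum_add, pv_H_diag, ih]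
    ring

theorem pv_square_eq (c : PySem.Dict (String × String) Int) (I : PySem.Dict String Int)
    (x : String) (l : List String) :
    (l.map (fun a => (l.map (fun b => pvH c I x a b)).sum)).sum
      = (l.count x : Int) * (l.countP (fun b => decide (x ≠ b) && pvWinB c I x b) : Int) := by
  have hmap : (l.map (fun a => (l.map (fun b => pvH c I x a b)).sum))
      = (l.map (fun a => if a = x
          then (l.countP (fun b => decide (x ≠ b) && pvWinB c I x b) : Int) else 0)) := by
    apply List.map_congr_left
    intro a _
    by_cases ha : a = x
    · subst ha
      simp only [if_pos rfl]
      rw [← pv_sum_countP (fun b => decide (a ≠ b) && pvWinB c I a b) l]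
      apply congrArg
      apply List.map_congr_left
      intro b _
      rw [pv_H_split]
      simp
    · simp only [if_neg ha]
      have : (l.map (fun b => pvH c I x a b)) = l.map (fun _ => (0 : Int)) := by
        apply List.map_congr_left
        intro b _
        rw [pv_H_split, if_neg ha]
      rw [this]; simp
  rw [hmap, pv_sum_if_const]

-- ===== score dicts: keys unique, values positive, same members, same max =====

def pvInv (d : PySem.Dict String Int) : Prop := d.keys.Nodup ∧ ∀ v ∈ d.values, 1 ≤ v

theorem pv_getD_zero_or_mem (d : PySem.Dict String Int) (k : String) :
    d.getD k 0 = 0 ∨ d.getD k 0 ∈ d.values := by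
  rw [PySem.Dict.getD_eq_get?_getD]
  cases h : d.get? k with
  | none => left; rfl
  | some v =>
    right
    have hm := PySem.Dict.mem_items_of_get?_eq_some d h
    simp only [PySem.Dict.values, Option.getD_some]
    exact List.mem_map_of_mem hm

theorem pv_inv_bump (d : PySem.Dict String Int) (fa : String) (h : pvInv d) :
    pvInv (d.insert fa (d.getD fa 0 + 1)) := by
  refine ⟨PySem.Dict.nodup_keys_insert d fa _ h.1, ?_⟩
  intro v hv
  rcases PySem.Dict.mem_values_insert d fa _ v hv with rfl | hv'
  · rcases pv_getD_zero_or_mem d fa with h0 | hmem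
    · omega
    · have := h.2 _ hmem; omega
  · exact h.2 v hv'

theorem pv_stepA_snd (I : PySem.Dict String Int)
    (st : PySem.Dict String (PySem.Dict String Int) × PySem.Dict String Int)
    (fa fb : String) :
    (pvScoreStepA I st fa fb).2 = st.2 ∨
    (pvScoreStepA I st fa fb).2 = st.2.insert fa (st.2.getD fa 0 + 1) := by
  unfold pvScoreStepA
  dsimp only
  split_ifs <;> simp

theorem pv_inv_stepA (I : PySem.Dict String Int)
    (st : PySem.Dict String (PySem.Dict String Int) × PySem.Dict String Int)
    (fa fb : String) (h : pvInv st.2) : pvInv (pvScoreStepA I st fa fb).2 := by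
  rcases pv_stepA_snd I st fa fb with h' | h' <;> rw [h']
  · exact h
  · exact pv_inv_bump st.2 fa h

theorem pv_stepB_cases (cnt : PySem.Dict (String × String) Int) (idx : PySem.Dict String Int)
    (a : String) (sc : PySem.Dict String Int) (b : String) :
    pvPairStepB cnt idx a sc b = sc ∨
    pvPairStepB cnt idx a sc b = sc.insert a (sc.getD a 0 + 1) ∨
    pvPairStepB cnt idx a sc b = sc.insert b (sc.getD b 0 + 1) := by
  unfold pvPairStepB
  dsimp only
  split_ifs <;> simp

theorem pv_inv_stepB (cnt : PySem.Dict (String × String) Int) (idx : PySem.Dict String Int)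
    (a : String) (sc : PySem.Dict String Int) (b : String) (h : pvInv sc) :
    pvInv (pvPairStepB cnt idx a sc b) := by
  rcases pv_stepB_cases cnt idx a sc b with h' | h' | h' <;> rw [h']
  · exact h
  · exact pv_inv_bump sc a h
  · exact pv_inv_bump sc b h

theorem pv_inv_empty : pvInv PySem.Dict.empty := by
  constructor
  · simp [PySem.Dict.keys_empty]
  · intro v hv
    simp [PySem.Dict.values, PySem.Dict.empty] at hv

theorem pv_inv_PA (friends gifts : List String) : pvInv (pvPA friends gifts) := by
  unfold pvPA
  refine pv_foldl_inv _
    (fun (st : PySem.Dict String (PySem.Dict String Int) × PySem.Dict String Int) =>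
      pvInv st.2) ?_ friends _ pv_inv_empty
  intro st fa h
  exact pv_foldl_inv _
    (fun (st : PySem.Dict String (PySem.Dict String Int) × PySem.Dict String Int) =>
      pvInv st.2)
    (fun st fb h => pv_inv_stepA (pvI gifts) st fa fb h) friends st h

theorem pv_inv_goB (cnt : PySem.Dict (String × String) Int) (idx : PySem.Dict String Int) :
    ∀ (l : List String) (sc : PySem.Dict String Int), pvInv sc → pvInv (pvGoB cnt idx l sc) := by
  intro l
  induction l with
  | nil => intro sc h; exact h
  | cons a r ih =>
    intro sc h
    exact ih _ (pv_foldl_inv _ pvInv (fun sc b h => pv_inv_stepB cnt idx a sc b h) r sc h)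

theorem pv_inv_SB (friends gifts : List String) : pvInv (pvSB friends gifts) := by
  unfold pvSB
  exact pv_inv_goB _ _ friends _ pv_inv_empty

theorem pv_mem_keys_iff (d : PySem.Dict String Int) (h1 : d.keys.Nodup)
    (h2 : ∀ v ∈ d.values, 1 ≤ v) (x : String) :
    x ∈ d.keys ↔ d.getD x 0 ≠ 0 := by
  constructor
  · intro hx
    cases h : d.get? x with
    | none => exact absurd ((PySem.Dict.get?_eq_none_iff_not_mem_keys d x).mp h) (not_not_intro hx)
    | some v =>
      have hm := PySem.Dict.mem_items_of_get?_eq_some d h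
      have hv : v ∈ d.values := by
        simp only [PySem.Dict.values]; exact List.mem_map_of_mem hm
      have := h2 v hv
      rw [PySem.Dict.getD_eq_get?_getD, h]
      simp
      omega
  · intro hz
    by_contra hx
    rw [PySem.Dict.getD_eq_get?_getD,
      (PySem.Dict.get?_eq_none_iff_not_mem_keys d x).mpr hx] at hz
    simp at hz

theorem pv_mem_values_iff (d : PySem.Dict String Int) (h1 : d.keys.Nodup) (v : Int) :
    v ∈ d.values ↔ ∃ k ∈ d.keys, d.getD k 0 = v := by
  rw [PySem.Dict.values_eq_map_keys d h1 0]
  simp [List.mem_map]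

theorem pv_max_congr (l1 l2 : List Int) (h : ∀ v, v ∈ l1 ↔ v ∈ l2) :
    (PySem.List.max? l1 (fun v => v)).getD 0 = (PySem.List.max? l2 (fun v => v)).getD 0 := by
  cases h1 : PySem.List.max? l1 (fun v => v) with
  | none =>
    have e1 : l1 = [] := (PySem.List.max?_eq_none_iff l1 _).mp h1
    subst e1
    cases l2 with
    | nil => rfl
    | cons a t => exact absurd ((h a).mpr (List.mem_cons_self)) (List.not_mem_nil)
  | some m1 =>
    cases h2 : PySem.List.max? l2 (fun v => v) with
    | none =>
      have e2 : l2 = [] := (PySem.List.max?_eq_none_iff l2 _).mp h2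
      subst e2
      exact absurd ((h m1).mp (PySem.List.max?_mem h1)) (List.not_mem_nil)
    | some m2 =>
      have hm1 : m1 ∈ l2 := (h m1).mp (PySem.List.max?_mem h1)
      have hm2 : m2 ∈ l1 := (h m2).mpr (PySem.List.max?_mem h2)
      have le1 : m1 ≤ m2 := PySem.List.max?_isMax h2 m1 hm1
      have le2 : m2 ≤ m1 := PySem.List.max?_isMax h1 m2 hm2
      simp
      omega

theorem pv_A_ret (d : PySem.Dict String Int) :
    (if d.items.isEmpty then (0 : Int)
     else (PySem.List.max? (d.items.map (fun kv => kv.2)) (fun v => v)).getD 0)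
      = (PySem.List.max? d.values (fun v => v)).getD 0 := by
  cases hd : d.items with
  | nil =>
    have hv : d.values = [] := by simp [PySem.Dict.values, hd]
    simp [hd, hv]
    cases hm : PySem.List.max? ([] : List Int) (fun v => v) with
    | none => rfl
    | some m => exact absurd (PySem.List.max?_mem hm) (List.not_mem_nil)
  | cons p t =>
    have hv : d.values = (p :: t).map (fun kv => kv.2) := by
      simp [PySem.Dict.values, hd]
    simp [hd, hv]

-- ===== assembly =====

theorem pv_solution_A (friends gifts : List String) :
    solution friends gifts
      = (PySem.List.max? (pvPA friends gifts).values (fun v => v)).getD 0 := by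
  unfold solution pvPA pvG pvI pvPairs
  rw [pv_gift_fold_A]
  rw [pv_A_ret]

theorem pv_solution_B (friends gifts : List String) :
    solution_alt friends gifts
      = (PySem.List.max? (pvSB friends gifts).values (fun v => v)).getD 0 := by
  unfold solution_alt pvSB pvC pvI pvPairs
  rw [pv_gift_fold_B]

theorem pv_view_final (gifts : List String) :
    ∀ x y, pvViewG (pvG gifts) x y = (pvC gifts).getD (x, y) 0 := by
  apply pv_cnt_view
  intro x y
  simp [pvViewG, PySem.Dict.getD_empty]

theorem pv_pt (friends gifts : List String) (x : String) :
    (pvPA friends gifts).getD x 0 = (pvSB friends gifts).getD x 0 := by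
  unfold pvPA pvSB
  rw [pv_outerA (pvI gifts) (pvC gifts) friends friends (pvG gifts, PySem.Dict.empty)
    (fun x' y' => pv_view_final gifts x' y') x]
  rw [pv_goB_getD, pv_T_eq_square, pv_square_eq]

theorem pv_values_mem (friends gifts : List String) (v : Int) :
    v ∈ (pvPA friends gifts).values ↔ v ∈ (pvSB friends gifts).values := by
  obtain ⟨n1, p1⟩ := pv_inv_PA friends gifts
  obtain ⟨n2, p2⟩ := pv_inv_SB friends gifts
  rw [pv_mem_values_iff _ n1, pv_mem_values_iff _ n2]
  constructor
  · rintro ⟨k, hk, hv⟩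
    refine ⟨k, ?_, ?_⟩
    · rw [pv_mem_keys_iff _ n2 p2, ← pv_pt]
      exact (pv_mem_keys_iff _ n1 p1 k).mp hk
    · rw [← pv_pt]; exact hv
  · rintro ⟨k, hk, hv⟩
    refine ⟨k, ?_, ?_⟩
    · rw [pv_mem_keys_iff _ n1 p1, pv_pt]
      exact (pv_mem_keys_iff _ n2 p2 k).mp hk
    · rw [pv_pt]; exact hv

-- ===== VERDICT (by name: the statement is the Claim_ definition above) =====
theorem solution_spec : Claim_equal_solution := by
  intro friends gifts _ _
  unfold Spec_solution
  rw [pv_solution_A, pv_solution_B]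
  exact pv_max_congr _ _ (pv_values_mem friends gifts)
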